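-- pv_equiv track=rewrite | github.com/obscurebit/bits | scripts/generate_links.py | is_disallowed_domain
-- ===== SOURCE A (Python) =====
-- DISALLOWED_BASE_DOMAINS = ("wikipedia.org", "archive.org", "github.com")
--
-- DISALLOWED_LINK_DOMAINS = {
--     "listverse.com", "buzzfeed.com", "boredpanda.com", "ranker.com",
--     "list25.com", "viralnova.com", "thecoolist.com", "therichest.com",
--     "softwareheritage.org", "packsify.com", "techaro.lol",
--     "newworldencyclopedia.org", "encyclopedia.com", "zxc.wiki",
--     "reddit.com", "www.reddit.com", "stackexchange.com", "worldbuilding.stackexchange.com",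
--     "medium.com", "substack.com", "linkedin.com", "facebook.com", "x.com", "twitter.com",
--     "youtube.com", "www.youtube.com", "bsky.app", "mastodon.social", "creativecommons.org",
--     "oclc.org", "policies.oclc.org", "help.oclc.org", "lite.ip2location.com",
--     "about.marginalia-search.com",
--     "sufficientvelocity.com", "forums.sufficientvelocity.com",
-- }
--
-- def is_disallowed_domain(domain: str) -> bool:
--     domain = domain.lower()
--     if domain.startswith("www."):
--         domain = domain[4:]
--     if any(domain == base or domain.endswith(f".{base}") for base in DISALLOWED_BASE_DOMAINS):
--         return True
--     if any(domain == blocked or domain.endswith(f".{blocked}") for blocked in DISALLOWED_LINK_DOMAINS):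
--         return True
--     if domain.endswith(".stackexchange.com"):
--         return True
--     return False
-- ===== SOURCE B (Python) =====
-- DISALLOWED_BASE_DOMAINS = ("wikipedia.org", "archive.org", "github.com")
--
-- DISALLOWED_LINK_DOMAINS = {
--     "listverse.com", "buzzfeed.com", "boredpanda.com", "ranker.com",
--     "list25.com", "viralnova.com", "thecoolist.com", "therichest.com",
--     "softwareheritage.org", "packsify.com", "techaro.lol",
--     "newworldencyclopedia.org", "encyclopedia.com", "zxc.wiki",
--     "reddit.com", "www.reddit.com", "stackexchange.com", "worldbuilding.stackexchange.com",
--     "medium.com", "substack.com", "linkedin.com", "facebook.com", "x.com", "twitter.com",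
--     "youtube.com", "www.youtube.com", "bsky.app", "mastodon.social", "creativecommons.org",
--     "oclc.org", "policies.oclc.org", "help.oclc.org", "lite.ip2location.com",
--     "about.marginalia-search.com",
--     "sufficientvelocity.com", "forums.sufficientvelocity.com",
-- }
--
-- _BLOCKED = frozenset(DISALLOWED_BASE_DOMAINS) | DISALLOWED_LINK_DOMAINS
--
--
-- def is_disallowed_domain(domain: str) -> bool:
--     d = domain.lower()
--     if d.startswith("www."):
--         d = d[4:]
--     # Prepend a dot so that "equal to a blocked name" and "subdomain of a
--     # blocked name" become one rule: some dot is followed by a blocked name.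
--     dotted = "." + d
--     return any(ch == "." and dotted[i + 1:] in _BLOCKED
--                for i, ch in enumerate(dotted))
-- ===== Notes on version B (the rewrite author's own statement) =====
-- stated objective: simpler
-- what changed: Instead of scanning every blocked name and testing equality/endswith against each (plus a redundant .stackexchange.com check), B prepends a dot and tests each dot-suffix of the domain for membership in one combined frozenset.
import Mathlib
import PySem

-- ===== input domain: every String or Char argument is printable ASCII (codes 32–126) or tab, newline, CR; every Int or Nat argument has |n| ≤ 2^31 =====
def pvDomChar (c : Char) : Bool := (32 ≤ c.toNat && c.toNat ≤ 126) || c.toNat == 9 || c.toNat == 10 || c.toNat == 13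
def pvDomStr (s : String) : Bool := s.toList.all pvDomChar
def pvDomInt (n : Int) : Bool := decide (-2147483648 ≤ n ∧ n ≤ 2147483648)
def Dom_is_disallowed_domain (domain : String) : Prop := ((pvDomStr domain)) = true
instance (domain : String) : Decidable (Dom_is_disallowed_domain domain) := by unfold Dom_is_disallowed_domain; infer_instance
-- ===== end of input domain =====

-- B replaces A's per-blocked-name equality/endswith scan (plus a redundant
-- ".stackexchange.com" check) by generating the dot-suffixes of "." ++ domain
-- and testing each for membership in one combined set; objective: simpler.


-- ===== PORT A =====
-- DISALLOWED_BASE_DOMAINS (a tuple)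
def pvBaseDomains : List String := ["wikipedia.org", "archive.org", "github.com"]

-- DISALLOWED_LINK_DOMAINS (a set literal; distinct elements in source order)
def pvLinkDomains : List String :=
  ["listverse.com", "buzzfeed.com", "boredpanda.com", "ranker.com",
   "list25.com", "viralnova.com", "thecoolist.com", "therichest.com",
   "softwareheritage.org", "packsify.com", "techaro.lol",
   "newworldencyclopedia.org", "encyclopedia.com", "zxc.wiki",
   "reddit.com", "www.reddit.com", "stackexchange.com", "worldbuilding.stackexchange.com",
   "medium.com", "substack.com", "linkedin.com", "facebook.com", "x.com", "twitter.com",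
   "youtube.com", "www.youtube.com", "bsky.app", "mastodon.social", "creativecommons.org",
   "oclc.org", "policies.oclc.org", "help.oclc.org", "lite.ip2location.com",
   "about.marginalia-search.com",
   "sufficientvelocity.com", "forums.sufficientvelocity.com"]

def is_disallowed_domain (domain : String) : Bool :=
  let d0 := PySem.Str.lower domain
  let d := if PySem.Str.startswith d0 "www." then PySem.Str.slice d0 (some 4) none else d0
  if pvBaseDomains.any (fun base =>
      d == base || PySem.Str.endswith d (String.ofList ('.' :: base.toList))) then
    true
  else if pvLinkDomains.any (fun blocked =>
      d == blocked || PySem.Str.endswith d (String.ofList ('.' :: blocked.toList))) then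
    true
  else if PySem.Str.endswith d ".stackexchange.com" then
    true
  else
    false

-- ===== PORT B =====
-- _BLOCKED = frozenset(DISALLOWED_BASE_DOMAINS) | DISALLOWED_LINK_DOMAINS
def pvBlocked : List String := PySem.Set.ofList (pvBaseDomains ++ pvLinkDomains)

def is_disallowed_domain_alt (domain : String) : Bool :=
  let d0 := PySem.Str.lower domain
  let d := if PySem.Str.startswith d0 "www." then PySem.Str.slice d0 (some 4) none else d0
  let dotted := '.' :: d.toList
  (PySem.List.enumerate dotted 0).any (fun p =>
    p.2 == '.' && pvBlocked.contains (String.ofList (PySem.List.slice dotted (some (p.1 + 1)) none)))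

-- ===== PRECONDITION & SPEC =====
def Spec_is_disallowed_domain (domain : String) (out : Bool) : Prop := out = is_disallowed_domain_alt domain
instance (domain : String) (out : Bool) : Decidable (Spec_is_disallowed_domain domain out) := by unfold Spec_is_disallowed_domain; infer_instance

-- ===== CLAIM (what is proved, stated in full; the proofs are below) =====
def Claim_equal_is_disallowed_domain : Prop := ∀ (domain : String), Dom_is_disallowed_domain domain → Spec_is_disallowed_domain domain (is_disallowed_domain domain)

-- ===== LEMMAS AND PROOFS =====

-- A dotted-suffix of ds is exactly a tail after a '.' at some position.
lemma pv_dotSuffix_iff (ds b : List Char) :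
    (('.' :: b) <:+ ds) ↔ ∃ k : Nat, ∃ _ : k < ds.length, ds[k] = '.' ∧ ds.drop (k+1) = b := by
  constructor
  · rintro ⟨u, rfl⟩
    refine ⟨u.length, by simp, by simp, ?_⟩
    simp
  · rintro ⟨k, h, hc, hd⟩
    have hds : ds.drop k = '.' :: b := by rw [List.drop_eq_getElem_cons h, hc, hd]
    exact hds ▸ List.drop_suffix k ds

-- B's scan over the dotted string finds exactly the blocked dotted-suffixes.
lemma pv_alt_iff (d : String) :
    ((PySem.List.enumerate ('.' :: d.toList) 0).any (fun p =>
      p.2 == '.' && pvBlocked.contains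
        (String.ofList (PySem.List.slice ('.' :: d.toList) (some (p.1 + 1)) none)))) = true
    ↔ ∃ b ∈ pvBlocked, ('.' :: b.toList) <:+ ('.' :: d.toList) := by
  rw [List.any_eq_true]
  constructor
  · rintro ⟨p, hp, hg⟩
    rw [PySem.List.mem_enumerate_iff] at hp
    obtain ⟨k, hk, rfl⟩ := hp
    simp only [Bool.and_eq_true, beq_iff_eq] at hg
    obtain ⟨hdot, hmem⟩ := hg
    have hcast : (0 : Int) + (k : Int) + 1 = ((k + 1 : Nat) : Int) := by push_cast; ring
    rw [hcast, PySem.List.slice_from_natCast] at hmem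
    rw [List.contains_iff_mem] at hmem
    refine ⟨_, hmem, ?_⟩
    rw [pv_dotSuffix_iff]
    exact ⟨k, hk, hdot, by rw [String.toList_ofList]⟩
  · rintro ⟨b, hb, hsuf⟩
    rw [pv_dotSuffix_iff] at hsuf
    obtain ⟨k, hk, hdot, hdrop⟩ := hsuf
    refine ⟨((0 : Int) + k, ('.' :: d.toList)[k]), ?_, ?_⟩
    · rw [PySem.List.mem_enumerate_iff]; exact ⟨k, hk, rfl⟩
    · simp only [Bool.and_eq_true, beq_iff_eq]
      refine ⟨hdot, ?_⟩
      have hcast : (0 : Int) + (k : Int) + 1 = ((k + 1 : Nat) : Int) := by push_cast; ring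
      rw [hcast, PySem.List.slice_from_natCast, hdrop, List.contains_iff_mem]
      have : String.ofList b.toList = b := by
        apply String.toList_inj.mp; rw [String.toList_ofList]
      rw [this]; exact hb

-- A's per-name test is the dotted-suffix test on the dotted string.
lemma pv_pername_iff (d b : String) :
    ((d == b || PySem.Str.endswith d (String.ofList ('.' :: b.toList))) = true)
    ↔ ('.' :: b.toList) <:+ ('.' :: d.toList) := by
  rw [List.suffix_cons_iff]
  simp only [Bool.or_eq_true, beq_iff_eq]
  constructor
  · rintro (rfl | h)
    · exact Or.inl rfl
    · refine Or.inr ?_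
      have := (PySem.Chars.endswith_iff d.toList (String.ofList ('.' :: b.toList)).toList).mp (by simpa using h)
      simpa [String.toList_ofList] using this
  · rintro (h | h)
    · have h2 : b.toList = d.toList := by injection h
      exact Or.inl (String.toList_inj.mp h2.symm)
    · refine Or.inr ?_
      have := (PySem.Chars.endswith_iff d.toList ('.' :: b.toList)).mpr h
      simpa [String.toList_ofList] using this

lemma pv_if_chain (a b c : Bool) :
    (if a then true else if b then true else if c then true else false) = (a || b || c) := by
  cases a <;> cases b <;> cases c <;> rfl

lemma pv_main (d : String) :
    (if pvBaseDomains.any (fun base =>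
        d == base || PySem.Str.endswith d (String.ofList ('.' :: base.toList))) then
      true
    else if pvLinkDomains.any (fun blocked =>
        d == blocked || PySem.Str.endswith d (String.ofList ('.' :: blocked.toList))) then
      true
    else if PySem.Str.endswith d ".stackexchange.com" then
      true
    else
      false)
    = (PySem.List.enumerate ('.' :: d.toList) 0).any (fun p =>
        p.2 == '.' && pvBlocked.contains
          (String.ofList (PySem.List.slice ('.' :: d.toList) (some (p.1 + 1)) none))) := by
  rw [pv_if_chain, Bool.eq_iff_iff, pv_alt_iff]
  simp only [Bool.or_eq_true]
  constructor
  · rintro ((h1 | h2) | h3)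
    · obtain ⟨b, hb, hP⟩ := List.any_eq_true.mp h1
      exact ⟨b, (PySem.Set.mem_ofList _ _).mpr (List.mem_append.mpr (Or.inl hb)),
        (pv_pername_iff d b).mp hP⟩
    · obtain ⟨b, hb, hP⟩ := List.any_eq_true.mp h2
      exact ⟨b, (PySem.Set.mem_ofList _ _).mpr (List.mem_append.mpr (Or.inr hb)),
        (pv_pername_iff d b).mp hP⟩
    · -- d ends with ".stackexchange.com": the blocked name "stackexchange.com" matches
      refine ⟨"stackexchange.com",
        (PySem.Set.mem_ofList _ _).mpr (List.mem_append.mpr (Or.inr (by simp [pvLinkDomains]))), ?_⟩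
      refine List.suffix_cons_iff.mpr (Or.inr ?_)
      have h := (PySem.Chars.endswith_iff d.toList (".stackexchange.com" : String).toList).mp (by simpa using h3)
      have he : ('.' :: ("stackexchange.com" : String).toList) = (".stackexchange.com" : String).toList := rfl
      rw [he]
      exact h
  · rintro ⟨b, hb, hsuf⟩
    have hP := (pv_pername_iff d b).mpr hsuf
    rcases List.mem_append.mp ((PySem.Set.mem_ofList _ _).mp hb) with hb' | hb'
    · exact Or.inl (Or.inl (List.any_eq_true.mpr ⟨b, hb', hP⟩))
    · exact Or.inl (Or.inr (List.any_eq_true.mpr ⟨b, hb', hP⟩))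

-- ===== VERDICT (by name: the statement is the Claim_ definition above) =====
set_option maxRecDepth 100000 in
theorem is_disallowed_domain_spec : Claim_equal_is_disallowed_domain := by
  intro domain _
  show is_disallowed_domain domain = is_disallowed_domain_alt domain
  unfold is_disallowed_domain is_disallowed_domain_alt
  exact pv_main _
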